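-- pv_equiv track=rewrite | github.com/saak1234/AI_CS307 | Week1/Week1_B.py | bfs_rabbit_leap
-- ===== SOURCE A (Python) =====
-- from collections import deque
--
-- def bfs_rabbit_leap(initial_state, goal_state):
--     queue = deque([(initial_state, [])])
--     visited = set([tuple(initial_state)])
--
--     while queue:
--         current_state, path = queue.popleft()
--
--         if current_state == goal_state:
--             return path + [current_state]
--
--         for i in range(len(current_state)):
--             if current_state[i] == '.':
--                 if i > 0 and current_state[i - 1] != '.':
--                     new_state = current_state[:]
--                     new_state[i], new_state[i - 1] = new_state[i - 1], new_state[i]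
--                     if tuple(new_state) not in visited:
--                         visited.add(tuple(new_state))
--                         queue.append((new_state, path + [current_state]))
--
--                 if i > 1 and current_state[i - 1] != '.' and current_state[i - 2] != '.':
--                     new_state = current_state[:]
--                     new_state[i], new_state[i - 2] = new_state[i - 2], new_state[i]
--                     if tuple(new_state) not in visited:
--                         visited.add(tuple(new_state))
--                         queue.append((new_state, path + [current_state]))
--
--                 if i < len(current_state) - 1 and current_state[i + 1] != '.':
--                     new_state = current_state[:]
--                     new_state[i], new_state[i + 1] = new_state[i + 1], new_state[i]
--                     if tuple(new_state) not in visited: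
--                         visited.add(tuple(new_state))
--                         queue.append((new_state, path + [current_state]))
--
--                 if i < len(current_state) - 2 and current_state[i + 1] != '.' and current_state[i + 2] != '.':
--                     new_state = current_state[:]
--                     new_state[i], new_state[i + 2] = new_state[i + 2], new_state[i]
--                     if tuple(new_state) not in visited:
--                         visited.add(tuple(new_state))
--                         queue.append((new_state, path + [current_state]))
--
--     return None
-- ===== SOURCE B (Python) =====
-- from collections import deque
--
-- def _moves(state):
--     out = []
--     n = len(state)
--     for i in range(n):
--         if state[i] == '.':
--             if i > 0 and state[i - 1] != '.':
--                 s = state[:]; s[i], s[i - 1] = s[i - 1], s[i]; out.append(s)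
--             if i > 1 and state[i - 1] != '.' and state[i - 2] != '.':
--                 s = state[:]; s[i], s[i - 2] = s[i - 2], s[i]; out.append(s)
--             if i < n - 1 and state[i + 1] != '.':
--                 s = state[:]; s[i], s[i + 1] = s[i + 1], s[i]; out.append(s)
--             if i < n - 2 and state[i + 1] != '.' and state[i + 2] != '.':
--                 s = state[:]; s[i], s[i + 2] = s[i + 2], s[i]; out.append(s)
--     return out
--
-- def bfs_rabbit_leap(initial_state, goal_state):
--     parent = {tuple(initial_state): None}
--     queue = deque([initial_state])
--     while queue:
--         current = queue.popleft()
--         if current == goal_state: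
--             path = []
--             node = current
--             while node is not None:
--                 path.append(node)
--                 node = parent[tuple(node)]
--             path.reverse()
--             return path
--         for ns in _moves(current):
--             if tuple(ns) not in parent:
--                 parent[tuple(ns)] = current
--                 queue.append(ns)
--     return None
-- ===== Notes on version B (the rewrite author's own statement) =====
-- stated objective: alternative
-- what changed: A's BFS carries a full copy of the root-to-node path with every queue entry; B queues only states and records a parent link per discovered state, reconstructing the path by following parent links from the goal and reversing it, with the same neighbor order and dequeue-time goal check.
import Mathlib
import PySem

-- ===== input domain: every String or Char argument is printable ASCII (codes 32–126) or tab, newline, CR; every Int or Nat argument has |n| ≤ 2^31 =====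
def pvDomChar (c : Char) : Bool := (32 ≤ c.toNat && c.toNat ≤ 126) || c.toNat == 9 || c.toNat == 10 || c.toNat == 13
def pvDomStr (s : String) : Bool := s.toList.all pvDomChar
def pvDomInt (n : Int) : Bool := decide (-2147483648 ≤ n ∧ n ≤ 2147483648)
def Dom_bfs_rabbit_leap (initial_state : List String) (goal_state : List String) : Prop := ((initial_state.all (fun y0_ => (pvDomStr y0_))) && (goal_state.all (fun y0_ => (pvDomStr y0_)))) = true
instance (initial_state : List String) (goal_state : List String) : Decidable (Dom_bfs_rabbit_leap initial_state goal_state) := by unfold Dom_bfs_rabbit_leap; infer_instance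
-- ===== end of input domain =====

-- B replaces A's path-in-queue BFS by a parent-map BFS (only states queued; the path is
-- reconstructed from parent links at the goal); same visit order, same returned path.

-- ===== PORT A =====
-- swap of positions i j (both reads from the original list, as Python's tuple assignment)
def pvSwap (xs : List String) (i j : Nat) : List String :=
  (xs.set i (xs.getD j "")).set j (xs.getD i "")

-- 'if tuple(new_state) not in visited: visited.add(...); queue.append((new_state, path + [current_state]))'
def pvPushA (cur : List String) (path : List (List String))
    (acc : List (List String × List (List String)) × PySem.Set (List String))
    (ns : List String) : List (List String × List (List String)) × PySem.Set (List String) :=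
  if PySem.Set.contains acc.2 ns then acc
  else (acc.1 ++ [(ns, path ++ [cur])], PySem.Set.add acc.2 ns)

-- the body of A's 'for i in range(len(current_state))' loop: the four guarded moves, in order
def pvStepA (cur : List String) (path : List (List String))
    (acc : List (List String × List (List String)) × PySem.Set (List String))
    (i : Nat) : List (List String × List (List String)) × PySem.Set (List String) :=
  if cur.getD i "" = "." then
    let acc := if 0 < i ∧ cur.getD (i-1) "" ≠ "." then pvPushA cur path acc (pvSwap cur i (i-1)) else acc
    let acc := if 1 < i ∧ cur.getD (i-1) "" ≠ "." ∧ cur.getD (i-2) "" ≠ "." then pvPushA cur path acc (pvSwap cur i (i-2)) else acc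
    let acc := if i+1 < cur.length ∧ cur.getD (i+1) "" ≠ "." then pvPushA cur path acc (pvSwap cur i (i+1)) else acc
    let acc := if i+2 < cur.length ∧ cur.getD (i+1) "" ≠ "." ∧ cur.getD (i+2) "" ≠ "." then pvPushA cur path acc (pvSwap cur i (i+2)) else acc
    acc
  else acc

-- 'while queue:' — fuel counts loop iterations; n^n+1 bounds them (every dequeued entry was
-- enqueued once, enqueued states are pairwise distinct length-n lists over initial's elements)
def pvLoopA (goal : List String) :
    Nat → List (List String × List (List String)) → PySem.Set (List String) →
    Option (List (List String))
  | 0, _, _ => none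
  | _+1, [], _ => none
  | f+1, (cur, path) :: rest, visited =>
    if cur = goal then some (path ++ [cur])
    else
      let acc := (List.range cur.length).foldl (pvStepA cur path) (rest, visited)
      pvLoopA goal f acc.1 acc.2

def bfs_rabbit_leap (initial_state : List String) (goal_state : List String) :
    Option (List (List String)) :=
  pvLoopA goal_state (initial_state.length ^ initial_state.length + 1)
    [(initial_state, [])] (PySem.Set.ofList [initial_state])

-- ===== PORT B =====
-- candidates appended by _moves for one index i (same four guards, same order as Source B)
def pvCandsAt (cur : List String) (i : Nat) : List (List String) :=
  if cur.getD i "" = "." then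
    (if 0 < i ∧ cur.getD (i-1) "" ≠ "." then [pvSwap cur i (i-1)] else []) ++
    (if 1 < i ∧ cur.getD (i-1) "" ≠ "." ∧ cur.getD (i-2) "" ≠ "." then [pvSwap cur i (i-2)] else []) ++
    (if i+1 < cur.length ∧ cur.getD (i+1) "" ≠ "." then [pvSwap cur i (i+1)] else []) ++
    (if i+2 < cur.length ∧ cur.getD (i+1) "" ≠ "." ∧ cur.getD (i+2) "" ≠ "." then [pvSwap cur i (i+2)] else [])
  else []

-- _moves(state)
def pvMoves (cur : List String) : List (List String) :=
  (List.range cur.length).foldl (fun out i => out ++ pvCandsAt cur i) []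

-- 'if tuple(ns) not in parent: parent[tuple(ns)] = current; queue.append(ns)'
def pvPushB (cur : List String)
    (acc : List (List String) × PySem.Dict (List String) (Option (List String)))
    (ns : List String) : List (List String) × PySem.Dict (List String) (Option (List String)) :=
  if PySem.Dict.contains acc.2 ns then acc
  else (acc.1 ++ [ns], PySem.Dict.insert acc.2 ns (some cur))

-- 'while node is not None: path.append(node); node = parent[tuple(node)]' — fuel size+1
-- bounds the chain length (parent links only point to earlier-discovered keys)
def pvFollow (parent : PySem.Dict (List String) (Option (List String))) :
    Nat → List String → List (List String)
  | 0, node => [node]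
  | f+1, node =>
    node :: (match PySem.Dict.get? parent node with
             | some (some p) => pvFollow parent f p
             | _ => [])

def pvLoopB (goal : List String) :
    Nat → List (List String) → PySem.Dict (List String) (Option (List String)) →
    Option (List (List String))
  | 0, _, _ => none
  | _+1, [], _ => none
  | f+1, cur :: rest, parent =>
    if cur = goal then some ((pvFollow parent (PySem.Dict.size parent + 1) cur).reverse)
    else
      let acc := (pvMoves cur).foldl (pvPushB cur) (rest, parent)
      pvLoopB goal f acc.1 acc.2

def bfs_rabbit_leap_alt (initial_state : List String) (goal_state : List String) :
    Option (List (List String)) :=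
  pvLoopB goal_state (initial_state.length ^ initial_state.length + 1)
    [initial_state] (PySem.Dict.insert PySem.Dict.empty initial_state none)

-- ===== PRECONDITION & SPEC =====
def Spec_bfs_rabbit_leap (initial_state : List String) (goal_state : List String) (out : Option (List (List String))) : Prop := out = bfs_rabbit_leap_alt initial_state goal_state
instance (initial_state : List String) (goal_state : List String) (out : Option (List (List String))) : Decidable (Spec_bfs_rabbit_leap initial_state goal_state out) := by unfold Spec_bfs_rabbit_leap; infer_instance

-- ===== CLAIM (what is proved, stated in full; the proofs are below) =====
def Claim_equal_bfs_rabbit_leap : Prop := ∀ (initial_state : List String) (goal_state : List String), Dom_bfs_rabbit_leap initial_state goal_state → Spec_bfs_rabbit_leap initial_state goal_state (bfs_rabbit_leap initial_state goal_state)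

-- ===== LEMMAS AND PROOFS =====

-- 'pvChain parent s p' : following parent links from s reaches the root, and the collected
-- root-to-s path (s excluded) is p.
inductive pvChain (parent : PySem.Dict (List String) (Option (List String))) :
    List String → List (List String) → Prop
  | root {s} : PySem.Dict.get? parent s = some none → pvChain parent s []
  | step {s t p} : PySem.Dict.get? parent s = some (some t) → pvChain parent t p →
      pvChain parent s (p ++ [t])

-- everything the simulation maintains about one queued state and its A-side path
def pvCurOK (parent : PySem.Dict (List String) (Option (List String)))
    (cur : List String) (path : List (List String)) : Prop :=
  pvChain parent cur path ∧ (path ++ [cur]).Nodup ∧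
    ∀ x ∈ path ++ [cur], x ∈ PySem.Dict.keys parent

-- the simulation invariant between A's (queue, visited) and B's (queue, parent)
def pvInv (qa : List (List String × List (List String))) (qb : List (List String))
    (visited : PySem.Set (List String))
    (parent : PySem.Dict (List String) (Option (List String))) : Prop :=
  qa.map Prod.fst = qb ∧
  (∀ s, PySem.Set.contains visited s = PySem.Dict.contains parent s) ∧
  (PySem.Dict.keys parent).Nodup ∧
  ∀ sp ∈ qa, pvCurOK parent sp.1 sp.2

lemma pvChain_insert {parent : PySem.Dict (List String) (Option (List String))}
    {s : List String} {p : List (List String)} (h : pvChain parent s p)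
    {k : List String} (hk : ∀ x ∈ p ++ [s], x ≠ k) (v : Option (List String)) :
    pvChain (PySem.Dict.insert parent k v) s p := by
  induction h with
  | @root s hs =>
    refine pvChain.root ?_
    rw [PySem.Dict.get?_insert_of_ne _ v (hk s (by simp))]
    exact hs
  | @step s t p hs _ ih =>
    refine pvChain.step ?_ (ih ?_)
    · rw [PySem.Dict.get?_insert_of_ne _ v (hk s (by simp))]; exact hs
    · intro x hx
      apply hk
      rcases List.mem_append.1 hx with h | h
      · exact List.mem_append.2 (Or.inl (List.mem_append.2 (Or.inl h)))
      · simp only [List.mem_singleton] at h; subst h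
        exact List.mem_append.2 (Or.inl (by simp))

lemma pvFollow_chain {parent : PySem.Dict (List String) (Option (List String))} :
    ∀ {s : List String} {p : List (List String)}, pvChain parent s p →
    ∀ f, p.length < f → pvFollow parent f s = (p ++ [s]).reverse := by
  intro s p h
  induction h with
  | @root s hs =>
    intro f hf
    match f, hf with
    | g+1, _ => simp [pvFollow, hs]
  | @step s t p hs hc ih =>
    intro f hf
    match f, hf with
    | g+1, hf =>
      have hg : p.length < g := by simp at hf; omega
      simp [pvFollow, hs, ih g hg]

lemma pvStepA_eq_fold (cur : List String) (path : List (List String))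
    (acc : List (List String × List (List String)) × PySem.Set (List String)) (i : Nat) :
    pvStepA cur path acc i = (pvCandsAt cur i).foldl (pvPushA cur path) acc := by
  unfold pvStepA pvCandsAt
  split_ifs <;> simp [List.foldl]

lemma pvStepA_fold_flat (cur : List String) (path : List (List String)) :
    ∀ (l : List Nat) (acc : List (List String × List (List String)) × PySem.Set (List String)),
      l.foldl (pvStepA cur path) acc
        = (l.flatMap (pvCandsAt cur)).foldl (pvPushA cur path) acc := by
  intro l
  induction l with
  | nil => intro acc; rfl
  | cons x xs ih =>
    intro acc
    simp only [List.foldl_cons, List.flatMap_cons, List.foldl_append, ih, pvStepA_eq_fold]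

lemma pvMoves_eq_flatMap (cur : List String) :
    pvMoves cur = (List.range cur.length).flatMap (pvCandsAt cur) := by
  unfold pvMoves
  generalize List.range cur.length = l
  induction l using List.reverseRecOn with
  | nil => rfl
  | append_singleton xs x ih => simp [List.foldl_append, ih]

lemma pvLen_le {l1 l2 : List (List String)} (h : l1.Nodup) (hs : ∀ x ∈ l1, x ∈ l2) :
    l1.length ≤ l2.length :=
  calc l1.length = l1.toFinset.card := (List.toFinset_card_of_nodup h).symm
    _ ≤ l2.toFinset.card :=
        Finset.card_le_card (fun x hx => List.mem_toFinset.2 (hs x (List.mem_toFinset.1 hx)))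
    _ ≤ l2.length := l2.toFinset_card_le

lemma pvPushOne {ra rb visited parent cur path} (ns : List String)
    (hinv : pvInv ra rb visited parent) (hcur : pvCurOK parent cur path) :
    pvInv (pvPushA cur path (ra, visited) ns).1 (pvPushB cur (rb, parent) ns).1
          (pvPushA cur path (ra, visited) ns).2 (pvPushB cur (rb, parent) ns).2 ∧
    pvCurOK (pvPushB cur (rb, parent) ns).2 cur path := by
  obtain ⟨hq, hvis, hnd, hgood⟩ := hinv
  obtain ⟨hch, hndp, hsub⟩ := hcur
  unfold pvPushA pvPushB
  by_cases hmem : PySem.Set.contains visited ns = true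
  · have hB : PySem.Dict.contains parent ns = true := (hvis ns) ▸ hmem
    simp only [hmem, hB, if_true]
    exact ⟨⟨hq, hvis, hnd, hgood⟩, hch, hndp, hsub⟩
  · have hmemB : PySem.Dict.contains parent ns = false := by
      rw [← hvis ns]; simpa using hmem
    have hnsk : ns ∉ PySem.Dict.keys parent := by
      intro h
      have := (PySem.Dict.contains_iff_mem_keys parent ns).2 h
      rw [hmemB] at this; cases this
    have hnsv : ns ∉ visited := by
      intro h; exact hmem ((PySem.Set.contains_iff visited ns).2 h)
    have hns_notin : ∀ x ∈ path ++ [cur], x ≠ ns := by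
      intro x hx he; subst he; exact hnsk (hsub x hx)
    have hcur' : pvCurOK (PySem.Dict.insert parent ns (some cur)) cur path := by
      refine ⟨pvChain_insert hch hns_notin _, hndp, ?_⟩
      intro x hx; rw [PySem.Dict.mem_keys_insert]; exact Or.inr (hsub x hx)
    simp only [hmem, hmemB, if_neg, Bool.false_eq_true, not_false_iff]
    refine ⟨⟨?_, ?_, ?_, ?_⟩, hcur'⟩
    · simp [hq]
    · intro x
      rw [PySem.Set.add_of_not_mem hnsv, PySem.Dict.contains_insert, Bool.eq_iff_iff]
      have hvx : x ∈ visited ↔ PySem.Dict.contains parent x = true := by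
        rw [← PySem.Set.contains_iff, hvis x]
      simp [hvx]
      tauto
    · exact PySem.Dict.nodup_keys_insert _ _ _ hnd
    · intro sp hsp
      rcases List.mem_append.1 hsp with h | h
      · obtain ⟨c1, c2, c3⟩ := hgood sp h
        refine ⟨pvChain_insert c1 (by intro x hx he; subst he; exact hnsk (c3 x hx)) _, c2, ?_⟩
        intro x hx; rw [PySem.Dict.mem_keys_insert]; exact Or.inr (c3 x hx)
      · simp only [List.mem_singleton] at h; subst h
        refine ⟨?_, ?_, ?_⟩
        · exact pvChain.step (PySem.Dict.get?_insert_self _ _ _) (pvChain_insert hch hns_notin _)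
        · exact List.Nodup.append hndp (List.nodup_singleton ns)
            (by intro x hx hy; simp only [List.mem_singleton] at hy; subst hy
                exact hns_notin x hx rfl)
        · intro x hx
          rw [PySem.Dict.mem_keys_insert]
          rcases List.mem_append.1 hx with h | h
          · exact Or.inr (hsub x h)
          · simp only [List.mem_singleton] at h; subst h; exact Or.inl rfl

lemma pvPushList {cur path} :
    ∀ (L : List (List String)) {ra rb visited parent},
    pvInv ra rb visited parent → pvCurOK parent cur path →
    pvInv (L.foldl (pvPushA cur path) (ra, visited)).1
          (L.foldl (pvPushB cur) (rb, parent)).1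
          (L.foldl (pvPushA cur path) (ra, visited)).2
          (L.foldl (pvPushB cur) (rb, parent)).2 := by
  intro L
  induction L with
  | nil => intro ra rb visited parent h _; exact h
  | cons ns L ih =>
    intro ra rb visited parent hinv hcur
    obtain ⟨h1, h2⟩ := pvPushOne ns hinv hcur
    simpa [List.foldl] using ih h1 h2

lemma pvLoop_eq (goal : List String) :
    ∀ (f : Nat) (qa : List (List String × List (List String))) qb visited parent,
    pvInv qa qb visited parent → pvLoopA goal f qa visited = pvLoopB goal f qb parent := by
  intro f
  induction f with
  | zero =>
    intro qa qb visited parent _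
    cases qa <;> cases qb <;> rfl
  | succ f ih =>
    intro qa qb visited parent hinv
    obtain ⟨hq, hvis, hnd, hgood⟩ := hinv
    cases qa with
    | nil => cases hq; rfl
    | cons hd ra =>
      obtain ⟨cur, path⟩ := hd
      subst hq
      obtain ⟨hch, hndp, hsub⟩ := hgood (cur, path) (by simp)
      by_cases hgoal : cur = goal
      · subst hgoal
        have hlen : path.length < PySem.Dict.size parent + 1 := by
          have h1 : (path ++ [cur]).length ≤ (PySem.Dict.keys parent).length :=
            pvLen_le hndp hsub
          have h2 : (PySem.Dict.keys parent).length = PySem.Dict.size parent := by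
            simp [PySem.Dict.keys, PySem.Dict.size]
          simp at h1; omega
        simp only [pvLoopA, pvLoopB, List.map_cons]
        rw [pvFollow_chain hch _ hlen, List.reverse_reverse]
        simp
      · have hinv' : pvInv ra (ra.map Prod.fst) visited parent :=
          ⟨rfl, hvis, hnd, fun sp hsp => hgood sp (by simp [hsp])⟩
        simp only [pvLoopA, pvLoopB, List.map_cons, if_neg hgoal]
        rw [pvStepA_fold_flat, pvMoves_eq_flatMap]
        exact ih _ _ _ _ (pvPushList _ hinv' ⟨hch, hndp, hsub⟩)

lemma pvInv_init (init : List String) :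
    pvInv [(init, [])] [init] (PySem.Set.ofList [init])
      (PySem.Dict.insert PySem.Dict.empty init none) := by
  refine ⟨by simp, ?_, ?_, ?_⟩
  · intro s
    rw [PySem.Dict.contains_insert,
        show PySem.Set.ofList [init] = [init] from rfl, Bool.eq_iff_iff]
    simp [PySem.Dict.contains_empty]
  · exact PySem.Dict.nodup_keys_insert _ _ _ (by simp [PySem.Dict.keys_empty])
  · intro sp hsp
    simp only [List.mem_singleton] at hsp; subst hsp
    refine ⟨pvChain.root (PySem.Dict.get?_insert_self _ _ _), by simp, ?_⟩
    intro x hx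
    simp only [List.nil_append, List.mem_singleton] at hx; subst hx
    rw [PySem.Dict.mem_keys_insert]
    exact Or.inl rfl

-- ===== VERDICT (by name: the statement is the Claim_ definition above) =====
theorem bfs_rabbit_leap_spec : Claim_equal_bfs_rabbit_leap := by
  intro init goal _
  unfold Spec_bfs_rabbit_leap bfs_rabbit_leap bfs_rabbit_leap_alt
  exact pvLoop_eq goal _ _ _ _ _ (pvInv_init init)
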